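-- pv_equiv track=rewrite | github.com/NahidMuntasir7/ai-powered-governance-dashboard | ai_processing.py | _fallback_categorize
-- ===== SOURCE A (Python) =====
-- def _fallback_categorize(text: str) -> str:
--     """Fallback categorization using keywords"""
--     text_lower = text.lower()
--
--     categories = {
--         'Traffic': ['traffic', 'road', 'car', 'bus', 'signal', 'parking', 'highway', 'street', 'vehicle', 'transportation'],
--         'Sanitation': ['garbage', 'waste', 'trash', 'clean', 'dirty', 'smell', 'sanitation', 'litter', 'dump'],
--         'Safety': ['crime', 'police', 'safety', 'security', 'theft', 'violence', 'dangerous', 'unsafe', 'attack'],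
--         'Water': ['water', 'pipe', 'supply', 'leak', 'flooding', 'sewage', 'drainage', 'tap', 'well'],
--         'Electricity': ['electricity', 'power', 'light', 'outage', 'blackout', 'transformer', 'electrical', 'cable'],
--         'Infrastructure': ['building', 'bridge', 'road', 'sidewalk', 'streetlight', 'maintenance', 'repair', 'construction']
--     }
--
--     scores = {}
--     for category, keywords in categories.items():
--         score = sum(1 for keyword in keywords if keyword in text_lower)
--         if score > 0:
--             scores[category] = score
--
--     if scores:
--         return max(scores.items(), key=lambda x: x[1])[0]
--     return 'Other'
-- ===== SOURCE B (Python) =====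
-- def _fallback_categorize(text: str) -> str:
--     """Fallback categorization by recursion on the category list: the head
--     category wins over the best of the remaining categories iff its score is
--     positive and >= the tail's best (so the earliest maximal category wins,
--     and ('Other', 0) is the base case). No scores dict, no max() call."""
--     text_lower = text.lower()
--
--     categories = [
--         ('Traffic', ['traffic', 'road', 'car', 'bus', 'signal', 'parking', 'highway', 'street', 'vehicle', 'transportation']),
--         ('Sanitation', ['garbage', 'waste', 'trash', 'clean', 'dirty', 'smell', 'sanitation', 'litter', 'dump']),
--         ('Safety', ['crime', 'police', 'safety', 'security', 'theft', 'violence', 'dangerous', 'unsafe', 'attack']),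
--         ('Water', ['water', 'pipe', 'supply', 'leak', 'flooding', 'sewage', 'drainage', 'tap', 'well']),
--         ('Electricity', ['electricity', 'power', 'light', 'outage', 'blackout', 'transformer', 'electrical', 'cable']),
--         ('Infrastructure', ['building', 'bridge', 'road', 'sidewalk', 'streetlight', 'maintenance', 'repair', 'construction']),
--     ]
--
--     def best(items):
--         if not items:
--             return ('Other', 0)
--         (category, keywords), rest = items[0], items[1:]
--         score = sum(1 for kw in keywords if kw in text_lower)
--         tail = best(rest)
--         if score > 0 and score >= tail[1]:
--             return (category, score)
--         return tail
--
--     return best(categories)[0]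
-- ===== Notes on version B (the rewrite author's own statement) =====
-- stated objective: alternative
-- what changed: Replaces the build-a-scores-dict-then-reduce-with-max pipeline by recursion on the category list built back-to-front: the answer for a list is the head category iff its score is positive and >= the best of the tail (base case ('Other', 0)), which realises the first-maximal tie-break without any dict, max() call, or mutable accumulator.
import Mathlib
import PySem

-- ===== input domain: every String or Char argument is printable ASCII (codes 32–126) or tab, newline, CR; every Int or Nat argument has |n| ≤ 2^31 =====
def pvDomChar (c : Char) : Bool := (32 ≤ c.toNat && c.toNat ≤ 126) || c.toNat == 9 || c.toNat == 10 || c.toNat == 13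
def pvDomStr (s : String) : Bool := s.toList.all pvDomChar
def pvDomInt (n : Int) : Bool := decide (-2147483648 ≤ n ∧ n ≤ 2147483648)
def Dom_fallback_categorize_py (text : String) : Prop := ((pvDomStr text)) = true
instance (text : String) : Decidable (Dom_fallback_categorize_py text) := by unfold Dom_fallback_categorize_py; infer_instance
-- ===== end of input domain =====

-- B replaces the scores-dict + max() reduction by recursion on the category list:
-- head wins iff its score is positive and >= the best of the tail (base case ("Other", 0)).

-- shared data: the fixed category → keywords table (same literals in both Pythons)
def pvCategories : List (String × List String) := [
  ("Traffic", ["traffic", "road", "car", "bus", "signal", "parking", "highway", "street", "vehicle", "transportation"]),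
  ("Sanitation", ["garbage", "waste", "trash", "clean", "dirty", "smell", "sanitation", "litter", "dump"]),
  ("Safety", ["crime", "police", "safety", "security", "theft", "violence", "dangerous", "unsafe", "attack"]),
  ("Water", ["water", "pipe", "supply", "leak", "flooding", "sewage", "drainage", "tap", "well"]),
  ("Electricity", ["electricity", "power", "light", "outage", "blackout", "transformer", "electrical", "cable"]),
  ("Infrastructure", ["building", "bridge", "road", "sidewalk", "streetlight", "maintenance", "repair", "construction"])]

-- ===== PORT A =====
def fallback_categorize_py (text : String) : String :=
  let text_lower := PySem.Str.lower text
  let scores : PySem.Dict String Int := pvCategories.foldl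
    (fun d p =>
      let score := (p.2.map (fun keyword => if PySem.Str.isIn keyword text_lower then (1 : Int) else 0)).sum
      if 0 < score then d.insert p.1 score else d)
    PySem.Dict.empty
  match PySem.List.max? scores.items (fun x => x.2) with
  | some m => m.1
  | none => "Other"

-- ===== PORT B =====
-- the inner recursive helper `best` of Source B
def pvBest (tl : String) : List (String × List String) → String × Int
  | [] => ("Other", 0)
  | p :: rest =>
    let score : Int := (p.2.map (fun kw => if PySem.Str.isIn kw tl then (1 : Int) else 0)).sum
    let tail := pvBest tl rest
    if 0 < score ∧ tail.2 ≤ score then (p.1, score) else tail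

def fallback_categorize_py_alt (text : String) : String :=
  let text_lower := PySem.Str.lower text
  (pvBest text_lower pvCategories).1

-- ===== PRECONDITION & SPEC =====
def Spec_fallback_categorize_py (text : String) (out : String) : Prop := out = fallback_categorize_py_alt text
instance (text : String) (out : String) : Decidable (Spec_fallback_categorize_py text out) := by unfold Spec_fallback_categorize_py; infer_instance

-- ===== CLAIM (what is proved, stated in full; the proofs are below) =====
def Claim_equal_fallback_categorize_py : Prop := ∀ (text : String), Dom_fallback_categorize_py text → Spec_fallback_categorize_py text (fallback_categorize_py text)

-- ===== LEMMAS AND PROOFS =====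

-- the dict A builds, when every inserted key is fresh, is just the positive-score pairs appended in order
theorem pv_dict_items (qs : List (String × Int)) (d : PySem.Dict String Int)
    (hfresh : ∀ q ∈ qs, d.contains q.1 = false) (hnd : (qs.map Prod.fst).Nodup) :
    (qs.foldl (fun d q => if 0 < q.2 then d.insert q.1 q.2 else d) d).items
      = d.items ++ qs.filter (fun q => decide (0 < q.2)) := by
  induction qs generalizing d with
  | nil => simp
  | cons q qs ih =>
    simp only [List.map_cons, List.nodup_cons] at hnd
    by_cases hq : 0 < q.2
    · have hc : d.contains q.1 = false := hfresh q (by simp)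
      have hins : (d.insert q.1 q.2).items = d.items ++ [(q.1, q.2)] := by
        simp [PySem.Dict.insert, hc]
      have hfresh' : ∀ r ∈ qs, (d.insert q.1 q.2).contains r.1 = false := by
        intro r hr
        have h1 : d.contains r.1 = false := hfresh r (by simp [hr])
        have h2 : q.1 ≠ r.1 := by
          intro h; exact hnd.1 (h ▸ List.mem_map_of_mem hr)
        simp only [PySem.Dict.contains] at h1 ⊢
        simp [hins, List.any_append, h1, h2]
      rw [List.foldl_cons, if_pos hq, ih _ hfresh' hnd.2, hins, List.filter_cons,
          if_pos (by simpa using hq)]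
      simp
    · rw [List.foldl_cons, if_neg hq, ih _ (fun r hr => hfresh r (by simp [hr])) hnd.2,
          List.filter_cons, if_neg (by simpa using hq)]

-- PySem.List.max? (first maximal element) of a nonempty list IS the strict-max fold seeded with the head
theorem pv_max_go (t : List (String × Int)) (m : String × Int) :
    PySem.List.max? (m :: t) (fun x => x.2)
      = some (t.foldl (fun best q => if best.2 < q.2 then q else best) m) := by
  induction t generalizing m with
  | nil => rfl
  | cons x t ih =>
    have h1 : PySem.List.max? (m :: x :: t) (fun x => x.2)
        = PySem.List.max? ((if m.2 < x.2 then x else m) :: t) (fun x => x.2) := by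
      by_cases h : m.2 < x.2 <;> simp [PySem.List.max?, h]
    rw [h1, ih, List.foldl_cons]

-- over all-positive pairs, the strict-max fold from ("Other", 0) computes the first maximum (or "Other" on [])
theorem pv_fold_max (qs : List (String × Int)) (hpos : ∀ q ∈ qs, 0 < q.2) :
    qs.foldl (fun best q => if best.2 < q.2 then q else best) ("Other", 0)
      = match PySem.List.max? qs (fun x => x.2) with
        | some m => m
        | none => ("Other", (0 : Int)) := by
  cases qs with
  | nil => rfl
  | cons x t =>
    have hx : (0 : Int) < x.2 := hpos x (by simp)
    rw [pv_max_go, List.foldl_cons, if_pos hx]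

-- the strict-max fold from any accumulator a of non-negative value: a survives iff it is at least the best
theorem pv_fold_acc (l : List (String × Int)) (a : String × Int) (ha : 0 ≤ a.2) :
    l.foldl (fun best q => if best.2 < q.2 then q else best) a
      = if (l.foldl (fun best q => if best.2 < q.2 then q else best) ("Other", 0)).2 ≤ a.2
        then a
        else l.foldl (fun best q => if best.2 < q.2 then q else best) ("Other", 0) := by
  induction l generalizing a with
  | nil => simp [ha]
  | cons q r ih =>
    simp only [List.foldl_cons]
    have hz : ((("Other", (0 : Int)) : String × Int)).2 < q.2 ↔ 0 < q.2 := Iff.rfl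
    by_cases hs : 0 < q.2
    · rw [if_pos (show (("Other", (0:Int)) : String × Int).2 < q.2 from hs)]
      by_cases haq : a.2 < q.2
      · rw [if_pos haq]
        rw [ih q (le_of_lt hs)]
        split_ifs with h1 h2 h2 <;> first | rfl | omega
      · rw [if_neg haq]
        rw [ih a ha, ih q (le_of_lt hs)]
        split_ifs with h1 h2 h2 <;> first | rfl | omega
    · rw [if_neg (show ¬ (("Other", (0:Int)) : String × Int).2 < q.2 from hs)]
      have haq : ¬ a.2 < q.2 := by omega
      rw [if_neg haq]
      exact ih a ha

-- B's recursion over the category list equals the strict-max fold over the positive score pairs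
theorem pv_best_eq_fold (tl : String) (l : List (String × List String)) :
    pvBest tl l
      = ((l.map (fun p => (p.1,
            (p.2.map (fun kw => if PySem.Str.isIn kw tl then (1 : Int) else 0)).sum))).filter
          (fun q => decide (0 < q.2))).foldl
          (fun best q => if best.2 < q.2 then q else best) ("Other", 0) := by
  induction l with
  | nil => rfl
  | cons p r ih =>
    simp only [pvBest, List.map_cons, List.filter_cons]
    set s : Int := (p.2.map (fun kw => if PySem.Str.isIn kw tl then (1 : Int) else 0)).sum with hs
    by_cases hpos : 0 < s
    · have hd : decide (0 < s) = true := by simpa using hpos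
      by_cases hc : (pvBest tl r).2 ≤ s
      · rw [if_pos ⟨hpos, hc⟩, if_pos hd, List.foldl_cons,
            if_pos (show (("Other", (0:Int)) : String × Int).2 < ((p.1, s) : String × Int).2 from hpos),
            pv_fold_acc _ (p.1, s) (le_of_lt hpos), ← ih, if_pos hc]
      · rw [if_neg (fun h => hc h.2), if_pos hd, List.foldl_cons,
            if_pos (show (("Other", (0:Int)) : String × Int).2 < ((p.1, s) : String × Int).2 from hpos),
            pv_fold_acc _ (p.1, s) (le_of_lt hpos), ← ih, if_neg hc]
    · rw [if_neg (fun h => hpos h.1),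
          if_neg (show ¬ decide (0 < s) = true by simpa using hpos)]
      exact ih

-- ===== VERDICT (by name: the statement is the Claim_ definition above) =====
theorem fallback_categorize_py_spec : Claim_equal_fallback_categorize_py := by
  intro text _
  unfold Spec_fallback_categorize_py fallback_categorize_py fallback_categorize_py_alt
  generalize PySem.Str.lower text = tl
  dsimp only
  have hA : (List.foldl
      (fun (d : PySem.Dict String Int) (p : String × List String) =>
        let score := (p.2.map (fun keyword => if PySem.Str.isIn keyword tl then (1 : Int) else 0)).sum
        if 0 < score then d.insert p.1 score else d)
      PySem.Dict.empty pvCategories).items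
      = (pvCategories.map
          (fun p => (p.1,
            (p.2.map (fun kw => if PySem.Str.isIn kw tl then (1 : Int) else 0)).sum))).filter
          (fun q => decide (0 < q.2)) := by
    have hnd : ((pvCategories.map
        (fun p => (p.1,
          (p.2.map (fun kw => if PySem.Str.isIn kw tl then (1 : Int) else 0)).sum))).map
        Prod.fst).Nodup := by
      have h : (pvCategories.map
          (fun p => (p.1,
            (p.2.map (fun kw => if PySem.Str.isIn kw tl then (1 : Int) else 0)).sum))).map
          Prod.fst = pvCategories.map Prod.fst := by simp
      rw [h]; decide
    have h := pv_dict_items (pvCategories.map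
        (fun p => (p.1,
          (p.2.map (fun kw => if PySem.Str.isIn kw tl then (1 : Int) else 0)).sum)))
      PySem.Dict.empty
      (fun q _ => by simp [PySem.Dict.contains, PySem.Dict.empty]) hnd
    rw [List.foldl_map] at h
    simpa [PySem.Dict.empty] using h
  rw [hA, pv_best_eq_fold,
      pv_fold_max _ (fun q hq => by simpa using (List.mem_filter.mp hq).2)]
  cases PySem.List.max?
      ((pvCategories.map
        (fun p => (p.1,
          (p.2.map (fun kw => if PySem.Str.isIn kw tl then (1 : Int) else 0)).sum))).filter
        (fun q => decide (0 < q.2))) (fun x => x.2) <;> rfl
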